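-- pv_equiv track=rewrite | github.com/cmmdotsh/dorothy | src/synthesis/summarizer.py | _pick_hero_image
-- ===== SOURCE A (Python) =====
-- from typing import Optional
--
-- def _pick_hero_image(articles: list[dict]) -> tuple[Optional[str], Optional[str]]:
--     """Pick the best hero image from articles, preferring center sources.
--
--     Returns:
--         (image_url, source_name) tuple
--     """
--     # Prefer images from center/lean sources for neutral framing
--     preference_order = ["center", "lean-left", "lean-right", "left", "right"]
--
--     for bias in preference_order:
--         for article in articles:
--             if article.get("source_bias") == bias and article.get("image_url"):
--                 return article["image_url"], article.get("source_name", "")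
--
--     # Fallback: first article with any image
--     for article in articles:
--         if article.get("image_url"):
--             return article["image_url"], article.get("source_name", "")
--
--     return None, None
-- ===== SOURCE B (Python) =====
-- from typing import Optional
--
-- _PREFERENCE_RANK = {"center": 0, "lean-left": 1, "lean-right": 2, "left": 3, "right": 4}
--
--
-- def _pick_hero_image(articles: list[dict]) -> tuple[Optional[str], Optional[str]]:
--     """Single pass: keep the first article (with a truthy image) of lowest bias rank."""
--     best = None  # (rank, image_url, source_name)
--     for article in articles:
--         url = article.get("image_url")
--         if not url:
--             continue
--         rank = _PREFERENCE_RANK.get(article.get("source_bias"), 5)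
--         if best is None or rank < best[0]:
--             best = (rank, url, article.get("source_name", ""))
--     if best is None:
--         return None, None
--     return best[1], best[2]
-- ===== Notes on version B (the rewrite author's own statement) =====
-- stated objective: simpler
-- what changed: Replaces A's bias-major cascade of scans (one pass per bias tier plus a fallback pass) with a single pass that ranks each article via a precomputed bias-to-priority dict and keeps the first article of strictly lowest rank.
import Mathlib
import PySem

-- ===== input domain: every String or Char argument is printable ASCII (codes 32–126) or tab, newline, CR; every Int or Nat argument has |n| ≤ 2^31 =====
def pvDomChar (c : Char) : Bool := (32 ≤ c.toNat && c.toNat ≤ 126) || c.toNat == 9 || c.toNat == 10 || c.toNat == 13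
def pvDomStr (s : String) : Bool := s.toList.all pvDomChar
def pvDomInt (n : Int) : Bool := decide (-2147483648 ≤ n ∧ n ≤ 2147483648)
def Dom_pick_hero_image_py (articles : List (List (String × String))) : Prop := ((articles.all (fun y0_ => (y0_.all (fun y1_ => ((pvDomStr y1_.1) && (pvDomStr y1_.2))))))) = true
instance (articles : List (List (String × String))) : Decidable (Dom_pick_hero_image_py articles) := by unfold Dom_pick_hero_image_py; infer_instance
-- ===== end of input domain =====

-- B replaces A's bias-major cascade of scans with one pass keeping the first lowest-rank
-- imaged article (rank from a bias→priority dict); objective: simpler. Return value only; no mutation.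

-- ===== PORT A =====
-- dict.get(k) / dict.get(k, dflt) on an article (dict ported as association list)
def pvGet? (d : List (String × String)) (k : String) : Option String :=
  PySem.Dict.get? (PySem.Dict.mk d) k

def pvGetD (d : List (String × String)) (k : String) (dflt : String) : String :=
  PySem.Dict.getD (PySem.Dict.mk d) k dflt

-- Python truthiness of `article.get("image_url")` (None or "" are falsy)
def pvTruthy (o : Option String) : Bool :=
  match o with | some s => s != "" | none => false

def pvPrefOrder : List String := ["center", "lean-left", "lean-right", "left", "right"]

-- `return article["image_url"], article.get("source_name", "")`: every call site's guard has
-- checked that "image_url" is present and truthy, so pvGet? is `some` here (no KeyError).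
def pvResultA (a : List (String × String)) : Option String × Option String :=
  (pvGet? a "image_url", some (pvGetD a "source_name" ""))

-- the two nested `for` loops with early return (inner loop = find?), then the fallback loop
def pvLoopA (bs : List String) (articles : List (List (String × String))) :
    Option String × Option String :=
  match bs with
  | [] =>
    match articles.find? (fun a => pvTruthy (pvGet? a "image_url")) with
    | some a => pvResultA a
    | none => (none, none)
  | b :: rest =>
    match articles.find? (fun a => (pvGet? a "source_bias" == some b) && pvTruthy (pvGet? a "image_url")) with
    | some a => pvResultA a
    | none => pvLoopA rest articles

def pick_hero_image_py (articles : List (List (String × String))) : Option String × Option String :=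
  pvLoopA pvPrefOrder articles

-- ===== PORT B =====
def pvRankDict : PySem.Dict String Nat :=
  PySem.Dict.mk [("center", 0), ("lean-left", 1), ("lean-right", 2), ("left", 3), ("right", 4)]

-- _PREFERENCE_RANK.get(article.get("source_bias"), 5); a missing bias (None) is not a key, so 5
def pvRank (a : List (String × String)) : Nat :=
  match pvGet? a "source_bias" with
  | none => 5
  | some b => PySem.Dict.getD pvRankDict b 5

-- one iteration of B's loop over `articles`, state = best : Option (rank, url, name)
def pvStep (best : Option (Nat × String × String)) (a : List (String × String)) :
    Option (Nat × String × String) :=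
  match pvGet? a "image_url" with
  | none => best
  | some u =>
    if u == "" then best
    else
      match best with
      | none => some (pvRank a, u, pvGetD a "source_name" "")
      | some (br, bu, bn) =>
        if pvRank a < br then some (pvRank a, u, pvGetD a "source_name" "") else some (br, bu, bn)

def pick_hero_image_py_alt (articles : List (List (String × String))) :
    Option String × Option String :=
  match articles.foldl pvStep none with
  | none => (none, none)
  | some (_, u, n) => (some u, some n)

-- ===== PRECONDITION & SPEC =====
def Spec_pick_hero_image_py (articles : List (List (String × String))) (out : Option String × Option String) : Prop := out = pick_hero_image_py_alt articles
instance (articles : List (List (String × String))) (out : Option String × Option String) : Decidable (Spec_pick_hero_image_py articles out) := by unfold Spec_pick_hero_image_py; infer_instance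

-- ===== CLAIM (what is proved, stated in full; the proofs are below) =====
def Claim_equal_pick_hero_image_py : Prop := ∀ (articles : List (List (String × String))), Dom_pick_hero_image_py articles → Spec_pick_hero_image_py articles (pick_hero_image_py articles)

-- ===== LEMMAS AND PROOFS =====

def pvPick (xs : List (List (String × String))) : Option (Nat × String × String) :=
  xs.foldl pvStep none

def pvMerge (a b : Option (Nat × String × String)) : Option (Nat × String × String) :=
  match a, b with
  | none, b => b
  | a, none => a
  | some (ar, au, an), some (br, bu, bn) =>
    if br < ar then some (br, bu, bn) else some (ar, au, an)

lemma pvMerge_none_right (a : Option (Nat × String × String)) : pvMerge a none = a := by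
  cases a <;> rfl

lemma pvStep_merge (acc : Option (Nat × String × String)) (a : List (String × String)) :
    pvStep acc a = pvMerge acc (pvStep none a) := by
  unfold pvStep
  cases h : pvGet? a "image_url" with
  | none => simp [pvMerge_none_right]
  | some u =>
    by_cases hu : u == ""
    · simp [hu, pvMerge_none_right]
    · cases acc with
      | none => simp [hu, pvMerge]
      | some p => obtain ⟨br, bu, bn⟩ := p; simp [hu, pvMerge]

lemma pvMerge_assoc (a b c : Option (Nat × String × String)) :
    pvMerge (pvMerge a b) c = pvMerge a (pvMerge b c) := by
  cases a with
  | none => rfl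
  | some pa =>
    cases b with
    | none => rfl
    | some pb =>
      cases c with
      | none => simp [pvMerge_none_right]
      | some pc =>
        obtain ⟨ar, au, an⟩ := pa; obtain ⟨br, bu, bn⟩ := pb; obtain ⟨cr, cu, cn⟩ := pc
        by_cases h1 : br < ar <;> by_cases h2 : cr < br <;> by_cases h3 : cr < ar <;>
          simp [pvMerge, h1, h2, h3] <;> first | rfl | (exfalso; omega)

lemma foldl_pvStep_merge (xs : List (List (String × String)))
    (acc : Option (Nat × String × String)) :
    xs.foldl pvStep acc = pvMerge acc (xs.foldl pvStep none) := by
  induction xs generalizing acc with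
  | nil => simp [pvMerge_none_right]
  | cons x xs ih =>
    simp only [List.foldl_cons]
    rw [ih (pvStep acc x), ih (pvStep none x), pvStep_merge acc x, pvMerge_assoc]

lemma pvPick_cons (x : List (String × String)) (xs : List (List (String × String))) :
    pvPick (x :: xs) = pvMerge (pvStep none x) (pvPick xs) := by
  unfold pvPick
  simp only [List.foldl_cons]
  rw [foldl_pvStep_merge]

lemma pvMerge_eq_none_iff (a b : Option (Nat × String × String)) :
    pvMerge a b = none ↔ a = none ∧ b = none := by
  cases a with
  | none => simp [pvMerge]
  | some pa =>
    cases b with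
    | none => simp [pvMerge_none_right]
    | some pb =>
      obtain ⟨ar, au, an⟩ := pa; obtain ⟨br, bu, bn⟩ := pb
      simp only [pvMerge]; split_ifs <;> simp

lemma pvStep_none_iff (a : List (String × String)) :
    pvStep none a = none ↔ pvTruthy (pvGet? a "image_url") = false := by
  unfold pvStep pvTruthy
  cases h : pvGet? a "image_url" with
  | none => simp
  | some u =>
    by_cases hu : u = ""
    · subst hu; simp
    · simp [hu]

lemma pvStep_eq_some (a : List (String × String)) (u : String)
    (h : pvGet? a "image_url" = some u) (hu : u ≠ "") :
    pvStep none a = some (pvRank a, u, pvGetD a "source_name" "") := by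
  unfold pvStep
  rw [h]
  simp [hu]

lemma pvStep_some_elim (a : List (String × String)) (p : Nat × String × String)
    (h : pvStep none a = some p) :
    pvGet? a "image_url" = some p.2.1 ∧ p.2.1 ≠ "" ∧ p.1 = pvRank a ∧
      p.2.2 = pvGetD a "source_name" "" := by
  cases ht : pvTruthy (pvGet? a "image_url") with
  | false => rw [(pvStep_none_iff a).mpr ht] at h; cases h
  | true =>
    unfold pvTruthy at ht
    cases hi : pvGet? a "image_url" with
    | none => rw [hi] at ht; cases ht
    | some v =>
      rw [hi] at ht
      have hv : v ≠ "" := by simpa using ht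
      have hs := pvStep_eq_some a v hi hv
      rw [h] at hs
      cases Option.some.inj hs
      exact ⟨rfl, hv, rfl, rfl⟩

lemma pvPick_eq_none (xs : List (List (String × String))) (h : pvPick xs = none) :
    ∀ a ∈ xs, pvStep none a = none := by
  induction xs with
  | nil => simp
  | cons x xs ih =>
    rw [pvPick_cons, pvMerge_eq_none_iff] at h
    intro a ha
    rcases List.mem_cons.mp ha with rfl | ha'
    · exact h.1
    · exact ih h.2 a ha'

lemma pvMerge_min (a b : Option (Nat × String × String)) (p : Nat × String × String)
    (h : pvMerge a b = some p) :
    (∀ q, a = some q → p.1 ≤ q.1) ∧ (∀ q, b = some q → p.1 ≤ q.1) := by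
  cases a with
  | none =>
    refine ⟨by simp, fun q hq => ?_⟩
    rw [hq] at h
    cases Option.some.inj h
    rfl
  | some pa =>
    cases b with
    | none =>
      rw [pvMerge_none_right] at h
      refine ⟨fun q hq => ?_, by simp⟩
      rw [hq] at h
      cases Option.some.inj h
      rfl
    | some pb =>
      obtain ⟨ar, au, an⟩ := pa; obtain ⟨br, bu, bn⟩ := pb
      simp only [pvMerge] at h
      split_ifs at h with hlt <;> cases Option.some.inj h <;>
        refine ⟨fun q hq => ?_, fun q hq => ?_⟩ <;> cases Option.some.inj hq <;>
        simp only <;> omega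

lemma pvPick_min (xs : List (List (String × String))) (p : Nat × String × String)
    (h : pvPick xs = some p) :
    ∀ a ∈ xs, ∀ q, pvStep none a = some q → p.1 ≤ q.1 := by
  induction xs generalizing p with
  | nil => simp [pvPick] at h
  | cons x xs ih =>
    rw [pvPick_cons] at h
    have hm := pvMerge_min _ _ _ h
    intro a ha q hq
    rcases List.mem_cons.mp ha with rfl | ha'
    · exact hm.1 q hq
    · cases hp : pvPick xs with
      | none => have := pvPick_eq_none xs hp a ha'; simp_all
      | some p' =>
        calc p.1 ≤ p'.1 := hm.2 p' hp
        _ ≤ q.1 := ih p' hp a ha' q hq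

lemma pvPick_decomp (xs : List (List (String × String))) (p : Nat × String × String)
    (h : pvPick xs = some p) :
    ∃ ys a zs, xs = ys ++ a :: zs ∧ pvStep none a = some p ∧
      ∀ y ∈ ys, ∀ q, pvStep none y = some q → p.1 < q.1 := by
  induction xs generalizing p with
  | nil => simp [pvPick] at h
  | cons x xs ih =>
    rw [pvPick_cons] at h
    cases hx : pvStep none x with
    | none =>
      rw [hx] at h
      simp only [pvMerge] at h
      obtain ⟨ys, a, zs, h1, h2, h3⟩ := ih p h
      refine ⟨x :: ys, a, zs, by simp [h1], h2, ?_⟩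
      intro y hy q hq
      rcases List.mem_cons.mp hy with rfl | hy'
      · rw [hx] at hq; cases hq
      · exact h3 y hy' q hq
    | some px =>
      cases hp : pvPick xs with
      | none =>
        rw [hx, hp, pvMerge_none_right] at h
        cases Option.some.inj h
        exact ⟨[], x, xs, rfl, hx, by simp⟩
      | some pp =>
        rw [hx, hp] at h
        obtain ⟨xr, xu, xn⟩ := px; obtain ⟨pr, pu, pn⟩ := pp
        simp only [pvMerge] at h
        split_ifs at h with hlt
        · cases Option.some.inj h
          obtain ⟨ys, a, zs, h1, h2, h3⟩ := ih _ hp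
          refine ⟨x :: ys, a, zs, by simp [h1], h2, ?_⟩
          intro y hy q hq
          rcases List.mem_cons.mp hy with rfl | hy'
          · rw [hx] at hq
            cases Option.some.inj hq
            exact hlt
          · exact h3 y hy' q hq
        · cases Option.some.inj h
          exact ⟨[], x, xs, rfl, hx, by simp⟩

lemma pvRank_val (a : List (String × String)) :
    pvRank a = if pvGet? a "source_bias" = some "center" then 0
      else if pvGet? a "source_bias" = some "lean-left" then 1
      else if pvGet? a "source_bias" = some "lean-right" then 2
      else if pvGet? a "source_bias" = some "left" then 3
      else if pvGet? a "source_bias" = some "right" then 4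
      else 5 := by
  unfold pvRank
  cases h : pvGet? a "source_bias" with
  | none => simp
  | some b =>
    simp only [Option.some_inj]
    unfold pvRankDict
    rw [PySem.Dict.getD_eq_get?_getD]
    simp only [PySem.Dict.get?_mk_cons]
    by_cases h1 : b = "center"
    · subst h1; simp
    by_cases h2 : b = "lean-left"
    · subst h2; simp
    by_cases h3 : b = "lean-right"
    · subst h3; simp
    by_cases h4 : b = "left"
    · subst h4; simp
    by_cases h5 : b = "right"
    · subst h5; simp
    simp [Ne.symm h1, Ne.symm h2, Ne.symm h3, Ne.symm h4, Ne.symm h5, h1, h2, h3, h4, h5]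
    rfl

lemma pvRank_le_five (a : List (String × String)) : pvRank a ≤ 5 := by
  rw [pvRank_val]; split_ifs <;> omega

lemma pvFind_bias_none (xs : List (List (String × String))) (r : Nat)
    (hmin : ∀ a ∈ xs, ∀ q, pvStep none a = some q → r ≤ q.1)
    (b : String) (i : Nat) (hb : PySem.Dict.getD pvRankDict b 5 = i) (hi : i < r) :
    xs.find? (fun a => (pvGet? a "source_bias" == some b) && pvTruthy (pvGet? a "image_url")) = none := by
  rw [List.find?_eq_none]
  intro a ha hp
  simp only [Bool.and_eq_true, beq_iff_eq] at hp
  obtain ⟨hbias, htr⟩ := hp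
  unfold pvTruthy at htr
  cases hu : pvGet? a "image_url" with
  | none => rw [hu] at htr; simp at htr
  | some u =>
    rw [hu] at htr
    have hstep := pvStep_eq_some a u hu (by simpa using htr)
    have := hmin a ha _ hstep
    simp only at this
    have hra : pvRank a = i := by unfold pvRank; rw [hbias]; exact hb
    omega

lemma pvFind_split {α : Type} (p : α → Bool) (ys zs : List α) (a : α)
    (hys : ∀ y ∈ ys, p y = false) (ha : p a = true) :
    (ys ++ a :: zs).find? p = some a := by
  induction ys with
  | nil => simp [ha]
  | cons y ys ih =>
    have hy := hys y (by simp)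
    simp only [List.cons_append, List.find?_cons, hy]
    exact ih (fun y' hy' => hys y' (by simp [hy']))

theorem pick_eq (xs : List (List (String × String))) :
    pick_hero_image_py xs = pick_hero_image_py_alt xs := by
  have halt : pick_hero_image_py_alt xs =
      (match pvPick xs with
        | none => (none, none)
        | some (_, u, n) => (some u, some n)) := rfl
  cases h : pvPick xs with
  | none =>
    have hall := pvPick_eq_none xs h
    have htr : ∀ a ∈ xs, pvTruthy (pvGet? a "image_url") = false :=
      fun a ha => (pvStep_none_iff a).mp (hall a ha)
    have h1 : ∀ b : String,
        xs.find? (fun a => (pvGet? a "source_bias" == some b) && pvTruthy (pvGet? a "image_url")) = none := by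
      intro b
      rw [List.find?_eq_none]
      intro a ha hp
      simp only [Bool.and_eq_true] at hp
      rw [htr a ha] at hp
      simp at hp
    have h2 : xs.find? (fun a => pvTruthy (pvGet? a "image_url")) = none := by
      rw [List.find?_eq_none]
      intro a ha hp
      rw [htr a ha] at hp
      simp at hp
    rw [halt, h]
    simp only [pick_hero_image_py, pvPrefOrder, pvLoopA, h1, h2]
  | some p =>
    obtain ⟨r, u, n⟩ := p
    obtain ⟨ys, a, zs, hxs, hsa, hys⟩ := pvPick_decomp xs _ h
    have hmin := pvPick_min xs _ h
    obtain ⟨hu', hune', hr', hn'⟩ := pvStep_some_elim a _ hsa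
    have hu : pvGet? a "image_url" = some u := hu'
    have hune : u ≠ "" := hune'
    have hr : r = pvRank a := hr'
    have hn : n = pvGetD a "source_name" "" := hn'
    have hr5 : r ≤ 5 := by rw [hr]; exact pvRank_le_five a
    rw [halt, h]
    -- a's predicate truthiness
    have hatr : pvTruthy (pvGet? a "image_url") = true := by
      unfold pvTruthy; rw [hu]; simpa using hune
    -- ys articles: any truthy one has rank > r
    have hysrank : ∀ y ∈ ys, ∀ q, pvStep none y = some q → r < q.1 := hys
    have hres : pvResultA a = (some u, some n) := by
      unfold pvResultA; rw [hu, hn]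
    -- the per-stage none lemma applied with hmin (min over all of xs)
    have hstage : ∀ (b : String) (i : Nat), PySem.Dict.getD pvRankDict b 5 = i → i < r →
        xs.find? (fun a => (pvGet? a "source_bias" == some b) && pvTruthy (pvGet? a "image_url")) = none :=
      fun b i hb hi => pvFind_bias_none xs r (fun a ha q hq => hmin a ha q hq) b i hb hi
    -- the found stage: if r < 5, the find? at bias pvPrefOrder[r] returns a
    have hfound : ∀ (b : String), pvGet? a "source_bias" = some b →
        xs.find? (fun x => (pvGet? x "source_bias" == some b) && pvTruthy (pvGet? x "image_url")) = some a := by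
      intro b hb
      rw [hxs]
      apply pvFind_split
      · intro y hy
        by_contra hp
        simp only [Bool.not_eq_false, Bool.and_eq_true, beq_iff_eq] at hp
        obtain ⟨hbias, htr⟩ := hp
        unfold pvTruthy at htr
        cases hu' : pvGet? y "image_url" with
        | none => rw [hu'] at htr; simp at htr
        | some u' =>
          rw [hu'] at htr
          have hstep := pvStep_eq_some y u' hu' (by simpa using htr)
          have hlt := hysrank y hy _ hstep
          have : pvRank y = pvRank a := by
            unfold pvRank; rw [hbias, hb]
          simp only at hlt
          omega
      · simp only [Bool.and_eq_true, beq_iff_eq]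
        exact ⟨hb, hatr⟩
    -- fallback: all imaged ys have been excluded when r = 5
    have hfall : r = 5 → xs.find? (fun a => pvTruthy (pvGet? a "image_url")) = some a := by
      intro hr5'
      rw [hxs]
      apply pvFind_split
      · intro y hy
        by_contra hp
        simp only [Bool.not_eq_false] at hp
        unfold pvTruthy at hp
        cases hu' : pvGet? y "image_url" with
        | none => rw [hu'] at hp; simp at hp
        | some u' =>
          rw [hu'] at hp
          have hstep := pvStep_eq_some y u' hu' (by simpa using hp)
          have hlt := hysrank y hy _ hstep
          have := pvRank_le_five y
          simp only at hlt
          omega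
      · exact hatr
    -- now case on the value of r
    have hrv := pvRank_val a
    rw [← hr] at hrv
    interval_cases r
    · -- r = 0: bias is "center"
      have hb : pvGet? a "source_bias" = some "center" := by
        split_ifs at hrv <;> first | assumption | omega
      simp only [pick_hero_image_py, pvPrefOrder, pvLoopA, hfound "center" hb, hres]
    · have hb : pvGet? a "source_bias" = some "lean-left" := by
        split_ifs at hrv <;> first | assumption | omega
      simp only [pick_hero_image_py, pvPrefOrder, pvLoopA,
        hstage "center" 0 rfl (by omega), hfound "lean-left" hb, hres]
    · have hb : pvGet? a "source_bias" = some "lean-right" := by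
        split_ifs at hrv <;> first | assumption | omega
      simp only [pick_hero_image_py, pvPrefOrder, pvLoopA,
        hstage "center" 0 rfl (by omega), hstage "lean-left" 1 rfl (by omega),
        hfound "lean-right" hb, hres]
    · have hb : pvGet? a "source_bias" = some "left" := by
        split_ifs at hrv <;> first | assumption | omega
      simp only [pick_hero_image_py, pvPrefOrder, pvLoopA,
        hstage "center" 0 rfl (by omega), hstage "lean-left" 1 rfl (by omega),
        hstage "lean-right" 2 rfl (by omega), hfound "left" hb, hres]
    · have hb : pvGet? a "source_bias" = some "right" := by
        split_ifs at hrv <;> first | assumption | omega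
      simp only [pick_hero_image_py, pvPrefOrder, pvLoopA,
        hstage "center" 0 rfl (by omega), hstage "lean-left" 1 rfl (by omega),
        hstage "lean-right" 2 rfl (by omega), hstage "left" 3 rfl (by omega),
        hfound "right" hb, hres]
    · -- r = 5: fallback
      simp only [pick_hero_image_py, pvPrefOrder, pvLoopA,
        hstage "center" 0 rfl (by omega), hstage "lean-left" 1 rfl (by omega),
        hstage "lean-right" 2 rfl (by omega), hstage "left" 3 rfl (by omega),
        hstage "right" 4 rfl (by omega), hfall rfl, hres]

-- ===== VERDICT (by name: the statement is the Claim_ definition above) =====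
theorem pick_hero_image_py_spec : Claim_equal_pick_hero_image_py := by
  intro articles _
  unfold Spec_pick_hero_image_py
  exact pick_eq articles
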